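-- pv_equiv track=rewrite | github.com/Oneiros101/Vigenere | methods.py | _repeat_key
-- ===== SOURCE A (Python) =====
-- def _repeat_key(text, key):
--     repeated_key = ""
--     KEY_LENGTH = len(key)
--     key_index = 0
--
--     for letter in text:
--         if not letter.isalpha():
--             repeated_key += letter
--         else:
--             repeated_key += key[key_index % KEY_LENGTH]
--             key_index += 1
--
--     return repeated_key
-- ===== SOURCE B (Python) =====
-- def _repeat_key(text, key):
--     positions = [i for i, c in enumerate(text) if c.isalpha()]
--     result = list(text)
--     for n, i in enumerate(positions):
--         result[i] = key[n % len(key)]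
--     return ''.join(result)
-- ===== Notes on version B (the rewrite author's own statement) =====
-- stated objective: alternative
-- what changed: Replaces the single sequential string-concatenation pass with two passes: first collect the indices of alphabetic characters, then positionally overwrite those slots of list(text) with the cycled key and join.
import Mathlib
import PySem

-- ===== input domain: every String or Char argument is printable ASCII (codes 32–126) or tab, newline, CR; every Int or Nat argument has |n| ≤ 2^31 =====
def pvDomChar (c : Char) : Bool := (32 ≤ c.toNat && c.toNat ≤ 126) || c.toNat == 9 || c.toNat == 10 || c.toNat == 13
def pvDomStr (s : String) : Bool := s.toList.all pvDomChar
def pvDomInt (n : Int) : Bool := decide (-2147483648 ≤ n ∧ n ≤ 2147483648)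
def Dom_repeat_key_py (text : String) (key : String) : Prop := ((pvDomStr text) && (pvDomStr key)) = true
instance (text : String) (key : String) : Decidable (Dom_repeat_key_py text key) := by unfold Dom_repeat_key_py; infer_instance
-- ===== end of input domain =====

-- B replaces A's sequential string-concatenation loop with two passes (collect
-- alphabetic indices, then positionally overwrite a copy of text): alternative
-- decomposition, return values equal wherever A returns (Pre_ excludes A's
-- ZeroDivisionError inputs: empty key with an alphabetic character in text).

-- ===== PORT A =====
-- A's for-loop over text with accumulator string and key_index counter.
def aLoop (key : String) (KL : Nat) : List Char → List Char → Nat → List Char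
  | acc, [], _ => acc
  | acc, letter :: rest, ki =>
    if ¬ PySem.Chars.isalpha letter then
      aLoop key KL (acc ++ [letter]) rest ki
    else
      -- key[ki % KL]; under Pre_ the index is in range, getD's default is never used
      aLoop key KL (acc ++ [key.toList.getD (ki % KL) ' ']) rest (ki + 1)

def repeat_key_py (text : String) (key : String) : String :=
  String.ofList (aLoop key key.toList.length [] text.toList 0)

-- ===== PORT B =====
-- [i for i, c in enumerate(text) if c.isalpha()]
def altPositions : List Char → Nat → List Nat
  | [], _ => []
  | c :: cs, i =>
    if PySem.Chars.isalpha c then i :: altPositions cs (i + 1) else altPositions cs (i + 1)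

-- for n, i in enumerate(positions): result[i] = key[n % len(key)]
def altPlace (key : String) : List Char → List Nat → Nat → List Char
  | res, [], _ => res
  | res, i :: ps, n =>
    altPlace key (res.set i (key.toList.getD (n % key.toList.length) ' ')) ps (n + 1)

def repeat_key_py_alt (text : String) (key : String) : String :=
  String.ofList (altPlace key text.toList (altPositions text.toList 0) 0)

-- ===== PRECONDITION & SPEC =====
-- Pre_ excludes exactly the inputs where Python A raises ZeroDivisionError
-- (empty key while text contains an alphabetic character); B raises there too.
def Pre_repeat_key_py (text : String) (key : String) : Prop :=
  key.toList ≠ [] ∨ text.toList.all (fun c => ¬ PySem.Chars.isalpha c)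
instance (text : String) (key : String) : Decidable (Pre_repeat_key_py text key) := by
  unfold Pre_repeat_key_py; infer_instance

def pvWitness_repeat_key_py : String × String := ("Attack at dawn!", "key")

def Spec_repeat_key_py (text : String) (key : String) (out : String) : Prop := out = repeat_key_py_alt text key
instance (text : String) (key : String) (out : String) : Decidable (Spec_repeat_key_py text key out) := by unfold Spec_repeat_key_py; infer_instance

-- ===== CLAIM (what is proved, stated in full; the proofs are below) =====
def Claim_equal_repeat_key_py : Prop := ∀ (text : String) (key : String), Dom_repeat_key_py text key → Pre_repeat_key_py text key → Spec_repeat_key_py text key (repeat_key_py text key)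

-- ===== LEMMAS AND PROOFS =====

-- common characterisation of both ports' result
def coreRK (key : String) : List Char → Nat → List Char
  | [], _ => []
  | c :: cs, k =>
    if PySem.Chars.isalpha c then
      key.toList.getD (k % key.toList.length) ' ' :: coreRK key cs (k + 1)
    else
      c :: coreRK key cs k

theorem aLoop_eq (key : String) (cs : List Char) :
    ∀ (acc : List Char) (k : Nat),
      aLoop key key.toList.length acc cs k = acc ++ coreRK key cs k := by
  induction cs with
  | nil => intro acc k; simp [aLoop, coreRK]
  | cons c cs ih =>
    intro acc k
    by_cases h : PySem.Chars.isalpha c = true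
    · simp only [aLoop, h, not_true_eq_false, ite_false, coreRK, if_pos]
      rw [ih]; simp
    · simp only [aLoop, h, coreRK]
      rw [ih]; simp

theorem altPlace_shift (key : String) (ps : List Nat) :
    ∀ (c : Char) (res : List Char) (n : Nat),
      altPlace key (c :: res) (ps.map (· + 1)) n = c :: altPlace key res ps n := by
  induction ps with
  | nil => intro c res n; simp [altPlace]
  | cons i ps ih => intro c res n; simp [altPlace, List.set, ih]

theorem altPositions_shift (cs : List Char) :
    ∀ (i : Nat), altPositions cs (i + 1) = (altPositions cs i).map (· + 1) := by
  induction cs with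
  | nil => intro i; simp [altPositions]
  | cons c cs ih =>
    intro i
    by_cases h : PySem.Chars.isalpha c = true <;>
      simp [altPositions, h, ih (i + 1)]

theorem altPlace_eq (key : String) (cs : List Char) :
    ∀ (n : Nat), altPlace key cs (altPositions cs 0) n = coreRK key cs n := by
  induction cs with
  | nil => intro n; simp [altPositions, altPlace, coreRK]
  | cons c cs ih =>
    intro n
    by_cases h : PySem.Chars.isalpha c = true
    · simp only [altPositions, h, if_pos, altPositions_shift cs 0, altPlace,
        List.set, coreRK]
      rw [altPlace_shift, ih]
    · simp only [altPositions, h, coreRK, altPositions_shift cs 0]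
      rw [if_neg (by simp), if_neg (by simp), altPlace_shift, ih]

-- ===== VERDICT (by name: the statement is the Claim_ definition above) =====
theorem repeat_key_py_spec : Claim_equal_repeat_key_py := by
  intro text key _ _
  unfold Spec_repeat_key_py repeat_key_py repeat_key_py_alt
  rw [aLoop_eq, altPlace_eq, List.nil_append]
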